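-- pv_equiv track=rewrite | github.com/advaitshirk99/Programming-practice | Python - IOT/trial11.py | busstop
-- ===== SOURCE A (Python) =====
-- def busstop(input1, input2):
--     for i in range(input1-1):
--         for j in range(i+1,input1):
--             if i==0:
--                 input2[j] -= input2[i]
--             if(i!=0):
--                 if(j%i==0):
--                     input2[j] -= input2[i]
--     return input2
-- ===== SOURCE B (Python) =====
-- def busstop(input1, input2):
--     # Same result and same in-place mutation of input2 as the original,
--     # but each divisor i visits only its multiples (step i) instead of
--     # testing j % i == 0 for every j.
--     n = input1
--     if n >= 2:
--         v0 = input2[0]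
--         for j in range(1, n):
--             input2[j] -= v0
--         for i in range(1, n - 1):
--             vi = input2[i]
--             for j in range(2 * i, n, i):
--                 input2[j] -= vi
--     return input2
-- ===== Notes on version B (the rewrite author's own statement) =====
-- stated objective: faster
-- what changed: For each divisor i the inner loop steps directly through the multiples of i (range(2*i, n, i)) with the row value cached, instead of scanning every j in (i, n) and testing j % i == 0; the i == 0 row becomes a single plain subtraction pass.
import Mathlib
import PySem

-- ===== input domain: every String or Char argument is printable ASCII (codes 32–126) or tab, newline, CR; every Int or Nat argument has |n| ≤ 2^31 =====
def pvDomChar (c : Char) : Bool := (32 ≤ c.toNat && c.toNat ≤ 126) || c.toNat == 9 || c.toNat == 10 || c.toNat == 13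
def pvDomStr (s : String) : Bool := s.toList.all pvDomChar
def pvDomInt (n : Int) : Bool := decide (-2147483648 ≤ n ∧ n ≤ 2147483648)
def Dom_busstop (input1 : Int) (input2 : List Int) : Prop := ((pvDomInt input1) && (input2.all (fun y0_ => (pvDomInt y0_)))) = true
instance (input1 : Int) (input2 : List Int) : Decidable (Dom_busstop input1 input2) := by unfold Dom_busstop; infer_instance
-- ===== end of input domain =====

-- B replaces A's inner scan 'for j in range(i+1, n): if j % i == 0' by a direct walk over the
-- multiples 'range(2*i, n, i)' with the row value read once (objective: faster).
-- Both Pythons mutate input2 in place identically; the equivalence proved is about the return value.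

-- ===== PORT A =====
def busstop (input1 : Int) (input2 : List Int) : List Int :=
  -- pyGetD/pySetD are exact under Pre_ (every index used is nonnegative and in range)
  (PySem.List.pyRange 0 (input1 - 1) 1).foldl (fun acc i =>
    (PySem.List.pyRange (i + 1) input1 1).foldl (fun acc2 j =>
      let acc3 := if i = 0 then
        PySem.List.pySetD acc2 j (PySem.List.pyGetD acc2 j 0 - PySem.List.pyGetD acc2 i 0)
      else acc2
      if i ≠ 0 then
        if PySem.Int.mod j i = 0 then
          PySem.List.pySetD acc3 j (PySem.List.pyGetD acc3 j 0 - PySem.List.pyGetD acc3 i 0)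
        else acc3
      else acc3) acc) input2

-- ===== PORT B =====
def busstop_alt (input1 : Int) (input2 : List Int) : List Int :=
  if 2 ≤ input1 then
    let v0 := PySem.List.pyGetD input2 0 0
    let l1 := (PySem.List.pyRange 1 input1 1).foldl
      (fun acc j => PySem.List.pySetD acc j (PySem.List.pyGetD acc j 0 - v0)) input2
    (PySem.List.pyRange 1 (input1 - 1) 1).foldl (fun acc i =>
      let vi := PySem.List.pyGetD acc i 0
      (PySem.List.pyRange (2 * i) input1 i).foldl
        (fun acc2 j => PySem.List.pySetD acc2 j (PySem.List.pyGetD acc2 j 0 - vi)) acc) l1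
  else input2

-- ===== PRECONDITION & SPEC =====
-- Pre_ excludes exactly the inputs where the Python raises IndexError: for input1 ≥ 2 both
-- programs index positions 1 .. input1-1, so the list must have at least input1 elements.
def Pre_busstop (input1 : Int) (input2 : List Int) : Prop :=
  input1 ≤ 1 ∨ input1 ≤ (input2.length : Int)
instance (input1 : Int) (input2 : List Int) : Decidable (Pre_busstop input1 input2) := by
  unfold Pre_busstop; infer_instance

def pvWitness_busstop : Int × List Int := (4, [5, 1, 2, 7])

def Spec_busstop (input1 : Int) (input2 : List Int) (out : List Int) : Prop :=
  out = busstop_alt input1 input2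
instance (input1 : Int) (input2 : List Int) (out : List Int) : Decidable (Spec_busstop input1 input2 out) := by
  unfold Spec_busstop; infer_instance

-- ===== CLAIM (what is proved, stated in full; the proofs are below) =====
def Claim_equal_busstop : Prop := ∀ (input1 : Int) (input2 : List Int),
  Dom_busstop input1 input2 → Pre_busstop input1 input2 →
  Spec_busstop input1 input2 (busstop input1 input2)

-- ===== LEMMAS AND PROOFS =====

-- a positive-step range is empty when the bounds cross
lemma pyRange_pos_nil (a b s : Int) (hs : 0 < s) (h : b ≤ a) :
    PySem.List.pyRange a b s = [] := by
  rw [PySem.List.pyRange_of_pos a b hs, if_neg (by omega)]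
  simp

-- cons form of a positive-step range
lemma pyRange_pos_cons (a b s : Int) (hs : 0 < s) (hab : a < b) :
    PySem.List.pyRange a b s = a :: PySem.List.pyRange (a + s) b s := by
  rw [PySem.List.pyRange_of_pos a b hs, PySem.List.pyRange_of_pos (a + s) b hs, if_pos hab]
  by_cases h : a + s < b
  · rw [if_pos h]
    have hc : ((b - a + s - 1) / s).toNat = ((b - (a + s) + s - 1) / s).toNat + 1 := by
      have he : b - a + s - 1 = (b - (a + s) + s - 1) + 1 * s := by ring
      rw [he, Int.add_mul_ediv_right _ _ (by omega : s ≠ 0)]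
      have h0 : 0 ≤ (b - (a + s) + s - 1) / s := Int.ediv_nonneg (by omega) (by omega)
      omega
    rw [hc]
    have hr : List.range (((b - (a + s) + s - 1) / s).toNat + 1)
        = 0 :: (List.range (((b - (a + s) + s - 1) / s).toNat)).map (· + 1) := by
      simpa using List.range_succ_eq_map (n := ((b - (a + s) + s - 1) / s).toNat)
    rw [hr, List.map_cons, List.map_map]
    simp only [Nat.cast_zero, mul_zero, add_zero]
    congr 1
    apply List.map_congr_left
    intro k _
    simp only [Function.comp_apply]
    push_cast
    ring
  · rw [if_neg h]
    have hd : (b - a + s - 1) / s = 1 := by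
      rw [← PySem.Int.floordiv_eq_ediv_of_pos hs]
      rw [PySem.Int.floordiv_eq_iff_of_pos hs]
      omega
    rw [hd]
    simp

-- foldl with a guarded body is foldl over the filtered list
lemma foldl_guard {alpha beta : Type} (p : alpha → Prop) [DecidablePred p] (f : beta → alpha → beta)
    (l : List alpha) (init : beta) :
    l.foldl (fun a x => if p x then f a x else a) init
      = (l.filter (fun x => decide (p x))).foldl f init := by
  induction l generalizing init with
  | nil => rfl
  | cons x t ih =>
    by_cases h : p x
    · simp [h, ih]
    · simp [h, ih]

-- the indices selected by 'j % i == 0' in [a, n) are exactly range(m, n, i),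
-- m being the unique multiple of i in [a, a + i)
lemma filter_mod_eq_pyRange (i : Int) (hi : 0 < i) :
    ∀ (fuel : Nat) (a m n : Int), (n - a).toNat ≤ fuel → i ∣ m → a ≤ m → m < a + i →
    (PySem.List.pyRange a n 1).filter (fun j => decide (PySem.Int.mod j i = 0))
      = PySem.List.pyRange m n i := by
  intro fuel
  induction fuel with
  | zero =>
    intro a m n hf hdvd ham hlt
    rw [PySem.List.pyRange_one_eq_nil (by omega : n ≤ a), pyRange_pos_nil m n i hi (by omega)]
    rfl
  | succ fuel ih =>
    intro a m n hf hdvd ham hlt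
    by_cases hna : n ≤ a
    · rw [PySem.List.pyRange_one_eq_nil hna, pyRange_pos_nil m n i hi (by omega)]
      rfl
    · rw [PySem.List.pyRange_one_cons (by omega : a < n), List.filter_cons]
      by_cases hda : i ∣ a
      · have hma : m = a := by
          obtain ⟨k, hk⟩ := hdvd
          obtain ⟨k2, hk2⟩ := hda
          have h1 : i * k2 ≤ i * k := by omega
          have h2 : i * k < i * (k2 + 1) := by
            have he : i * (k2 + 1) = i * k2 + i := by ring
            omega
          have h3 : k2 ≤ k := le_of_mul_le_mul_left h1 hi
          have h4 : k < k2 + 1 := lt_of_mul_lt_mul_left h2 (by omega)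
          have hkk : k = k2 := by omega
          rw [hk, hk2, hkk]
        subst hma
        rw [if_pos (by simpa [PySem.Int.mod_eq_zero_iff_dvd] using hda)]
        rw [pyRange_pos_cons m n i hi (by omega)]
        congr 1
        exact ih (m + 1) (m + i) n (by omega) (hdvd.add ⟨1, by ring⟩) (by omega) (by omega)
      · have hma : a < m := by
          rcases lt_or_eq_of_le ham with h | h
          · exact h
          · exact absurd (h ▸ hdvd) hda
        rw [if_neg (by simpa [PySem.Int.mod_eq_zero_iff_dvd] using hda)]
        exact ih (a + 1) m n (by omega) hdvd (by omega) (by omega)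

-- a row of subtractions at indices ≠ i never changes position i, so the
-- subtrahend may be read once before the row (B caches it as v0 / vi)
lemma row_cached (i : Int) (hi : 0 ≤ i) :
    ∀ (l : List Int), (∀ j ∈ l, 0 ≤ j ∧ j ≠ i) → ∀ (acc : List Int),
    l.foldl (fun a j => PySem.List.pySetD a j (PySem.List.pyGetD a j 0 - PySem.List.pyGetD a i 0)) acc
      = l.foldl (fun a j => PySem.List.pySetD a j (PySem.List.pyGetD a j 0 - PySem.List.pyGetD acc i 0)) acc := by
  intro l
  induction l with
  | nil => intro _ acc; rfl
  | cons j t ih =>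
    intro hmem acc
    obtain ⟨hj0, hji⟩ := hmem j List.mem_cons_self
    simp only [List.foldl_cons]
    have hkey : ∀ v, PySem.List.pyGetD (PySem.List.pySetD acc j v) i 0 = PySem.List.pyGetD acc i 0 := by
      intro v
      rw [PySem.List.pySetD_of_nonneg acc v hj0, PySem.List.pyGetD_of_nonneg _ 0 hi,
        PySem.List.pyGetD_of_nonneg _ 0 hi]
      simp [List.getD, List.getElem?_set_ne (by omega : j.toNat ≠ i.toNat)]
    rw [ih (fun x hx => hmem x (List.mem_cons_of_mem j hx))
      (PySem.List.pySetD acc j (PySem.List.pyGetD acc j 0 - PySem.List.pyGetD acc i 0))]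
    rw [hkey]

-- A's inner loop at i = 0 is a plain subtraction pass with the value at 0 read once
lemma rowA0_eq (n : Int) (acc : List Int) :
    (PySem.List.pyRange 1 n 1).foldl (fun acc2 j =>
      let acc3 := if (0 : Int) = 0 then
        PySem.List.pySetD acc2 j (PySem.List.pyGetD acc2 j 0 - PySem.List.pyGetD acc2 0 0)
      else acc2
      if (0 : Int) ≠ 0 then
        if PySem.Int.mod j 0 = 0 then
          PySem.List.pySetD acc3 j (PySem.List.pyGetD acc3 j 0 - PySem.List.pyGetD acc3 0 0)
        else acc3
      else acc3) acc
    = (PySem.List.pyRange 1 n 1).foldl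
        (fun a j => PySem.List.pySetD a j (PySem.List.pyGetD a j 0 - PySem.List.pyGetD acc 0 0)) acc := by
  have hb : (fun (acc2 : List Int) (j : Int) =>
      let acc3 := if (0 : Int) = 0 then
        PySem.List.pySetD acc2 j (PySem.List.pyGetD acc2 j 0 - PySem.List.pyGetD acc2 0 0)
      else acc2
      if (0 : Int) ≠ 0 then
        if PySem.Int.mod j 0 = 0 then
          PySem.List.pySetD acc3 j (PySem.List.pyGetD acc3 j 0 - PySem.List.pyGetD acc3 0 0)
        else acc3
      else acc3)
      = fun a j => PySem.List.pySetD a j (PySem.List.pyGetD a j 0 - PySem.List.pyGetD a 0 0) := by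
    funext a j
    simp
  rw [hb]
  exact row_cached 0 le_rfl _ (fun j hj => by
    have := (PySem.List.mem_pyRange_one).1 hj
    exact ⟨by omega, by omega⟩) acc

-- A's inner loop at i ≥ 1 equals B's walk over the multiples with the value at i read once
lemma rowA_eq (n i : Int) (hi : 1 ≤ i) (acc : List Int) :
    (PySem.List.pyRange (i + 1) n 1).foldl (fun acc2 j =>
      let acc3 := if i = 0 then
        PySem.List.pySetD acc2 j (PySem.List.pyGetD acc2 j 0 - PySem.List.pyGetD acc2 i 0)
      else acc2
      if i ≠ 0 then
        if PySem.Int.mod j i = 0 then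
          PySem.List.pySetD acc3 j (PySem.List.pyGetD acc3 j 0 - PySem.List.pyGetD acc3 i 0)
        else acc3
      else acc3) acc
    = (PySem.List.pyRange (2 * i) n i).foldl
        (fun acc2 j => PySem.List.pySetD acc2 j (PySem.List.pyGetD acc2 j 0 - PySem.List.pyGetD acc i 0)) acc := by
  have hi0 : ¬ (i = 0) := by omega
  have hb : (fun (acc2 : List Int) (j : Int) =>
      let acc3 := if i = 0 then
        PySem.List.pySetD acc2 j (PySem.List.pyGetD acc2 j 0 - PySem.List.pyGetD acc2 i 0)
      else acc2
      if i ≠ 0 then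
        if PySem.Int.mod j i = 0 then
          PySem.List.pySetD acc3 j (PySem.List.pyGetD acc3 j 0 - PySem.List.pyGetD acc3 i 0)
        else acc3
      else acc3)
      = fun acc2 j => if PySem.Int.mod j i = 0 then
          PySem.List.pySetD acc2 j (PySem.List.pyGetD acc2 j 0 - PySem.List.pyGetD acc2 i 0)
        else acc2 := by
    funext acc2 j
    simp [hi0]
  rw [hb]
  rw [foldl_guard (fun j => PySem.Int.mod j i = 0)
    (fun a j => PySem.List.pySetD a j (PySem.List.pyGetD a j 0 - PySem.List.pyGetD a i 0))]
  rw [filter_mod_eq_pyRange i (by omega) (n - (i + 1)).toNat (i + 1) (2 * i) n le_rfl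
    ⟨2, by ring⟩ (by omega) (by omega)]
  exact row_cached i (by omega) _ (fun j hj => by
    have := (PySem.List.mem_pyRange_iff_of_pos (by omega : (0:Int) < i) j).1 hj
    exact ⟨by omega, by omega⟩) acc

-- ===== VERDICT (by name: the statement is the Claim_ definition above) =====
theorem busstop_spec : Claim_equal_busstop := by
  intro n xs _ hpre
  unfold Spec_busstop busstop busstop_alt
  by_cases h2 : 2 ≤ n
  · rw [if_pos h2]
    rw [PySem.List.pyRange_one_cons (by omega : (0:Int) < n - 1), List.foldl_cons]
    rw [show (0:Int) + 1 = 1 by ring]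
    rw [rowA0_eq n xs]
    exact PySem.List.foldl_congr_mem _ _ _ _ (fun acc i hi => by
      have := (PySem.List.mem_pyRange_one).1 hi
      exact rowA_eq n i (by omega) acc)
  · rw [if_neg h2, PySem.List.pyRange_one_eq_nil (by omega : n - 1 ≤ 0)]
    rfl
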